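-- pv_equiv track=rewrite | github.com/emretezel/pyvalue | src/pyvalue/metrics/enterprise_value.py | merge_currency_codes
-- ===== SOURCE A (Python) =====
-- from typing import Callable, Optional, Sequence
--
-- def merge_currency_codes(codes: Sequence[Optional[str]]) -> Optional[str]:
--     merged: Optional[str] = None
--     for code in codes:
--         if not code:
--             continue
--         if merged is None:
--             merged = code
--         elif merged != code:
--             return None
--     return merged
-- ===== SOURCE B (Python) =====
-- from typing import Optional, Sequence
--
-- def merge_currency_codes(codes: Sequence[Optional[str]]) -> Optional[str]:
--     distinct = {c for c in codes if c}
--     if len(distinct) == 1: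
--         return next(iter(distinct))
--     return None
-- ===== Notes on version B (the rewrite author's own statement) =====
-- stated objective: simpler
-- what changed: Replaces the accumulator-with-early-conflict-return loop by a two-phase collect-then-decide: build the set of distinct truthy codes, return its sole element iff its cardinality is 1.
import Mathlib
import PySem

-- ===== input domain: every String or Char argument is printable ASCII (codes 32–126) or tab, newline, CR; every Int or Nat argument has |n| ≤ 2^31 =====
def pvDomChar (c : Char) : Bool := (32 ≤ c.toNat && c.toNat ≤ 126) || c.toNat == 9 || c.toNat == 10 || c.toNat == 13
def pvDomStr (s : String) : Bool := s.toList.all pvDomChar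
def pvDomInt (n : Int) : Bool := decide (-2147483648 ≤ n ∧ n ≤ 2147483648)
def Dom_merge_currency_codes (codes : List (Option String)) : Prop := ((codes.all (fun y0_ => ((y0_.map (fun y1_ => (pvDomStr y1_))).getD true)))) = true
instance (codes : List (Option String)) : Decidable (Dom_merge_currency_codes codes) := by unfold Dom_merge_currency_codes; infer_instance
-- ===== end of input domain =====

-- B replaces A's accumulator loop with early conflict return by a collect-then-decide
-- shape (set of distinct truthy codes, cardinality check); objective: simpler.

-- ===== PORT A =====
-- the for-loop of A with its 'merged' accumulator; 'return None' on conflict is the 'none' branch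
def mccLoop : List (Option String) → Option String → Option String
  | [], merged => merged
  | c :: rest, merged =>
    match c with
    | none => mccLoop rest merged                       -- 'if not code: continue'
    | some s =>
      if s = "" then mccLoop rest merged                -- '' is falsy too
      else
        match merged with
        | none => mccLoop rest (some s)
        | some m => if m ≠ s then none else mccLoop rest merged

def merge_currency_codes (codes : List (Option String)) : Option String :=
  mccLoop codes none

-- ===== PORT B =====
-- the truthy codes, in order ('c for c in codes if c')
def mccTruthy (codes : List (Option String)) : List String :=
  codes.filterMap (fun c =>
    match c with
    | none => none
    | some s => if s = "" then none else some s)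

def merge_currency_codes_alt (codes : List (Option String)) : Option String :=
  match PySem.Set.ofList (mccTruthy codes) with
  | [s] => some s                                       -- len(distinct) == 1
  | _ => none

-- ===== PRECONDITION & SPEC =====
def Spec_merge_currency_codes (codes : List (Option String)) (out : Option String) : Prop := out = merge_currency_codes_alt codes
instance (codes : List (Option String)) (out : Option String) : Decidable (Spec_merge_currency_codes codes out) := by unfold Spec_merge_currency_codes; infer_instance

-- ===== CLAIM (what is proved, stated in full; the proofs are below) =====
def Claim_equal_merge_currency_codes : Prop := ∀ (codes : List (Option String)), Dom_merge_currency_codes codes → Spec_merge_currency_codes codes (merge_currency_codes codes)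

-- ===== LEMMAS AND PROOFS =====

-- A's loop with a non-None accumulator returns it iff every remaining truthy code equals it
theorem mccLoop_some (codes : List (Option String)) (m : String) :
    mccLoop codes (some m) =
      if (mccTruthy codes).all (fun x => x == m) then some m else none := by
  induction codes with
  | nil => simp [mccLoop, mccTruthy]
  | cons c rest ih =>
    match c with
    | none => simpa [mccLoop, mccTruthy, List.filterMap_cons] using ih
    | some s =>
      by_cases hs : s = ""
      · simpa [mccLoop, mccTruthy, List.filterMap_cons, hs] using ih
      · by_cases hm : m = s
        · subst hm
          simpa [mccLoop, mccTruthy, List.filterMap_cons, hs] using ih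
        · simp only [mccLoop, mccTruthy, List.filterMap_cons, hs]
          simp [hm, Ne.symm hm]

-- A's result characterised by the truthy-code list
theorem mccLoop_none (codes : List (Option String)) :
    mccLoop codes none =
      match mccTruthy codes with
      | [] => none
      | t :: ts => if ts.all (fun x => x == t) then some t else none := by
  induction codes with
  | nil => simp [mccLoop, mccTruthy]
  | cons c rest ih =>
    match c with
    | none => simpa [mccLoop, mccTruthy, List.filterMap_cons] using ih
    | some s =>
      by_cases hs : s = ""
      · simpa [mccLoop, mccTruthy, List.filterMap_cons, hs] using ih
      · simp [mccLoop, mccTruthy, hs, mccLoop_some]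

-- B's cardinality-1 test characterised the same way
theorem ofList_single (T : List String) :
    (match PySem.Set.ofList T with
      | [s] => some s
      | _ => (none : Option String)) =
      match T with
      | [] => none
      | t :: ts => if ts.all (fun x => x == t) then some t else none := by
  match T with
  | [] => rfl
  | t :: ts =>
    rw [PySem.Set.ofList_cons]
    by_cases h : ts.all (fun x => x == t)
    · have hd : PySem.Set.discard (PySem.Set.ofList ts) t = [] := by
        rw [List.eq_nil_iff_forall_not_mem]
        intro x hx
        rw [PySem.Set.mem_discard] at hx
        have hxts : x ∈ ts := (PySem.Set.mem_ofList _ _).mp hx.1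
        have := List.all_eq_true.mp h x hxts
        exact hx.2 (by simpa using this)
      simp [hd, h]
    · obtain ⟨x, hx, hxne⟩ := by
        simpa [List.all_eq_true] using h
      have hmem : x ∈ PySem.Set.discard (PySem.Set.ofList ts) t := by
        rw [PySem.Set.mem_discard, PySem.Set.mem_ofList]
        exact ⟨hx, by simpa using hxne⟩
      have hne : PySem.Set.discard (PySem.Set.ofList ts) t ≠ [] := by
        intro hnil; rw [hnil] at hmem; exact absurd hmem (List.not_mem_nil)
      match hD : PySem.Set.discard (PySem.Set.ofList ts) t with
      | [] => exact absurd hD hne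
      | d :: ds => simp [h]

-- ===== VERDICT (by name: the statement is the Claim_ definition above) =====
theorem merge_currency_codes_spec : Claim_equal_merge_currency_codes := by
  intro codes _
  unfold Spec_merge_currency_codes merge_currency_codes merge_currency_codes_alt
  rw [mccLoop_none, ofList_single]
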